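-- pv_equiv track=rewrite | github.com/ackness/multicall.py | multicall/multicall.py | _partition_calls
-- ===== SOURCE A (Python) =====
-- from typing import List, Dict, Union, Optional, Generator, Iterable
--
-- def _partition_calls(
--     calls: Iterable, batch_size: int
-- ) -> Generator[List, None, None]:
--     batch = []
--     for item in calls:
--         batch.append(item)
--         if batch_size > 0 and len(batch) >= batch_size:
--             yield batch
--             batch = []
--     if len(batch) > 0:
--         yield batch
-- ===== SOURCE B (Python) =====
-- from itertools import islice
--
-- def _partition_calls(calls, batch_size):
--     it = iter(calls)
--     if batch_size > 0:
--         while True: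
--             chunk = list(islice(it, batch_size))
--             if not chunk:
--                 break
--             yield chunk
--     else:
--         rest = list(it)
--         if rest:
--             yield rest
-- ===== Notes on version B (the rewrite author's own statement) =====
-- stated objective: alternative
-- what changed: B pulls fixed-size chunks from an iterator with islice instead of A's per-item accumulation with a length check, handling the batch_size<=0 all-in-one-batch case as an explicit fallback.
import Mathlib
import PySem

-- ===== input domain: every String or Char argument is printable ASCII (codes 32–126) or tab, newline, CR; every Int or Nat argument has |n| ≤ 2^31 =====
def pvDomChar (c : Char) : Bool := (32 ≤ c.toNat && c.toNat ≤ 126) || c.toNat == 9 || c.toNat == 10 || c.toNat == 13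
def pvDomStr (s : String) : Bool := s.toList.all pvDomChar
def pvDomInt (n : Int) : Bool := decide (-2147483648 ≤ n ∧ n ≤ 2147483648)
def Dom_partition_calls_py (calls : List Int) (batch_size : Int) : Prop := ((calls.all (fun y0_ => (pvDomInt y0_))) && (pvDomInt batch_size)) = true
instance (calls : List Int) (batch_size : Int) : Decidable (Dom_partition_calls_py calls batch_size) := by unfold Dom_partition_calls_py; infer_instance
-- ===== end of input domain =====

-- B pulls fixed-size chunks with islice instead of A's per-item accumulation; same cost, different loop shape. Return-value equivalence (both are generators; we compare the yielded lists).


-- ===== PORT A =====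
-- loop body: batch.append(item); if batch_size > 0 and len(batch) >= batch_size: yield batch; batch = []
def pyStepA (batch_size : Int) (st : List (List Int) × List Int) (item : Int) : List (List Int) × List Int :=
  let batch := st.2 ++ [item]
  if 0 < batch_size ∧ batch_size ≤ (batch.length : Int) then (st.1 ++ [batch], ([] : List Int))
  else (st.1, batch)

-- trailing: if len(batch) > 0: yield batch
def pyFinishA (st : List (List Int) × List Int) : List (List Int) :=
  if 0 < st.2.length then st.1 ++ [st.2] else st.1

def partition_calls_py (calls : List Int) (batch_size : Int) : List (List Int) :=
  pyFinishA (calls.foldl (pyStepA batch_size) ([], []))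

-- ===== PORT B =====
-- while True: chunk = list(islice(it, k+1)); if not chunk: break; yield chunk
-- (chunk size is k+1 so the recursion visibly shrinks; the caller passes k = batch_size - 1)
def chunksB (k : Nat) : List Int → List (List Int)
  | [] => []
  | x :: rest => (x :: rest.take k) :: chunksB k (rest.drop k)
termination_by xs => xs.length
decreasing_by simp [List.length_drop]

def partition_calls_py_alt (calls : List Int) (batch_size : Int) : List (List Int) :=
  if 0 < batch_size then chunksB (batch_size.toNat - 1) calls
  else if calls = [] then [] else [calls]

-- ===== PRECONDITION & SPEC =====
def Spec_partition_calls_py (calls : List Int) (batch_size : Int) (out : List (List Int)) : Prop := out = partition_calls_py_alt calls batch_size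
instance (calls : List Int) (batch_size : Int) (out : List (List Int)) : Decidable (Spec_partition_calls_py calls batch_size out) := by unfold Spec_partition_calls_py; infer_instance

-- ===== CLAIM (what is proved, stated in full; the proofs are below) =====
def Claim_equal_partition_calls_py : Prop := ∀ (calls : List Int) (batch_size : Int), Dom_partition_calls_py calls batch_size → Spec_partition_calls_py calls batch_size (partition_calls_py calls batch_size)

-- ===== LEMMAS AND PROOFS =====

-- batch_size ≤ 0: A's emit condition never fires, the loop just accumulates
lemma foldl_nonpos (bs : Int) (h : bs ≤ 0) :
    ∀ (calls : List Int) (out : List (List Int)) (batch : List Int),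
      calls.foldl (pyStepA bs) (out, batch) = (out, batch ++ calls) := by
  intro calls
  induction calls with
  | nil => intro out batch; simp
  | cons x xs ih =>
      intro out batch
      simp only [List.foldl_cons, pyStepA]
      rw [if_neg (by intro hc; omega)]
      simpa using ih out (batch ++ [x])

-- a full chunk peels off the front
lemma chunksB_full (k : Nat) (l ys : List Int) (hl : l.length = k + 1) :
    chunksB k (l ++ ys) = l :: chunksB k ys := by
  match l, hl with
  | x :: t, hl =>
      have ht : t.length = k := by simpa using hl
      rw [List.cons_append, chunksB,
          List.take_append_of_le_length (by omega), List.drop_append_of_le_length (by omega),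
          List.take_of_length_le (by omega), List.drop_eq_nil_of_le (by omega)]
      simp

-- loop invariant for batch_size = k + 1: the pending batch (shorter than a chunk)
-- prefixes the remaining input, and the finished output is out ++ chunks of the rest
lemma invA (bs : Int) (k : Nat) (hbs : bs = (k : Int) + 1) :
    ∀ (calls : List Int) (out : List (List Int)) (batch : List Int), batch.length ≤ k →
      pyFinishA (calls.foldl (pyStepA bs) (out, batch)) = out ++ chunksB k (batch ++ calls) := by
  intro calls
  induction calls with
  | nil =>
      intro out batch hb
      match batch with
      | [] =>
          simp only [List.foldl_nil, List.append_nil]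
          rw [chunksB]
          simp [pyFinishA]
      | x :: t =>
          have ht : t.length ≤ k := by simp at hb; omega
          simp only [List.foldl_nil, List.append_nil]
          rw [chunksB, List.take_of_length_le ht, List.drop_eq_nil_of_le ht, chunksB]
          simp [pyFinishA]
  | cons x xs ih =>
      intro out batch hb
      simp only [List.foldl_cons, pyStepA]
      by_cases hfull : batch.length = k
      · have hcond : 0 < bs ∧ bs ≤ (((batch ++ [x]).length : Nat) : Int) := by
          refine ⟨by omega, ?_⟩
          have hlen : (batch ++ [x]).length = k + 1 := by simp [hfull]
          rw [hlen]; push_cast; omega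
        rw [if_pos hcond]
        rw [ih (out ++ [batch ++ [x]]) [] (Nat.zero_le k)]
        have h2 : batch ++ x :: xs = (batch ++ [x]) ++ xs := by simp
        rw [h2, chunksB_full k (batch ++ [x]) xs (by simp [hfull])]
        simp
      · have hcond : ¬(0 < bs ∧ bs ≤ (((batch ++ [x]).length : Nat) : Int)) := by
          rintro ⟨h1, h2⟩
          have hlen : (batch ++ [x]).length = batch.length + 1 := by simp
          rw [hlen] at h2; push_cast at h2; omega
        rw [if_neg hcond]
        rw [ih out (batch ++ [x]) (by simp; omega)]
        simp

-- ===== VERDICT (by name: the statement is the Claim_ definition above) =====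
theorem partition_calls_py_spec : Claim_equal_partition_calls_py := by
  intro calls batch_size _
  unfold Spec_partition_calls_py partition_calls_py partition_calls_py_alt
  by_cases hpos : 0 < batch_size
  · rw [if_pos hpos]
    have hk : batch_size = ((batch_size.toNat - 1 : Nat) : Int) + 1 := by omega
    rw [invA batch_size (batch_size.toNat - 1) hk calls [] [] (Nat.zero_le _)]
    simp
  · rw [if_neg hpos]
    rw [foldl_nonpos batch_size (by omega) calls [] []]
    simp only [List.nil_append]
    match calls with
    | [] => simp [pyFinishA]
    | y :: t => simp [pyFinishA]
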